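-- pv_equiv track=rewrite | github.com/martinfrasch/researchtwin | backend/connectors/orcid.py | _name_matches
-- ===== SOURCE A (Python) =====
-- def _split_name(name: str) -> tuple[list[str], str]:
--     """Split into (given-name tokens, surname).  Last token = surname."""
--     import re
--     parts = re.sub(r"[.\-,]", " ", name.lower()).split()
--     parts = [p for p in parts if p]
--     if len(parts) < 2:
--         return parts, parts[0] if parts else ""
--     return parts[:-1], parts[-1]
--
-- def _name_matches(display_name: str, author_name: str) -> bool:
--     """Check if two researcher names refer to the same person.
--
--     Handles abbreviated forms common in Semantic Scholar:
--       "Gerlinde Metz" vs "G. Metz"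
--       "Martin Frasch" vs "M. H. Frasch"
--       "Gerlinde A. S. Metz" vs "Gerlinde Metz"
--     """
--     given_a, surname_a = _split_name(display_name)
--     given_b, surname_b = _split_name(author_name)
--
--     # Surnames must match
--     if surname_a != surname_b:
--         return False
--
--     # If either has no given names, surname match is enough
--     if not given_a or not given_b:
--         return True
--
--     # Check if any given-name token from one side matches (or is an
--     # initial of) a given-name token on the other side.
--     def _initial_match(tokens_a: list[str], tokens_b: list[str]) -> bool:
--         for ta in tokens_a:
--             for tb in tokens_b:
--                 if ta == tb:
--                     return True
--                 if len(ta) == 1 and tb.startswith(ta):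
--                     return True
--                 if len(tb) == 1 and ta.startswith(tb):
--                     return True
--         return False
--
--     return _initial_match(given_a, given_b)
-- ===== SOURCE B (Python) =====
-- def _split_name(name):
--     """Split into (given-name tokens, surname).  Last token = surname."""
--     import re
--     parts = re.sub(r"[.\-,]", " ", name.lower()).split()
--     parts = [p for p in parts if p]
--     if len(parts) < 2:
--         return parts, parts[0] if parts else ""
--     return parts[:-1], parts[-1]
--
-- def _name_matches(display_name: str, author_name: str) -> bool:
--     given_a, surname_a = _split_name(display_name)
--     given_b, surname_b = _split_name(author_name)
--
--     if surname_a != surname_b: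
--         return False
--     if not given_a or not given_b:
--         return True
--
--     # Index the b-side tokens once: full tokens, their initials, and the
--     # single-letter tokens; then a single pass over the a-side tokens.
--     full_b = set(given_b)
--     initials_b = {tb[:1] for tb in given_b}
--     singles_b = {tb for tb in given_b if len(tb) == 1}
--     return any(
--         ta in full_b
--         or (len(ta) == 1 and ta in initials_b)
--         or (len(ta) > 1 and ta[:1] in singles_b)
--         for ta in given_a
--     )
-- ===== Notes on version B (the rewrite author's own statement) =====
-- stated objective: alternative
-- what changed: The nested token-by-token scan in _initial_match is replaced by three lookup structures built once from the b-side tokens (full-token set, first-letter set, single-letter-token set) and a single pass over the a-side tokens.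
import Mathlib
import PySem

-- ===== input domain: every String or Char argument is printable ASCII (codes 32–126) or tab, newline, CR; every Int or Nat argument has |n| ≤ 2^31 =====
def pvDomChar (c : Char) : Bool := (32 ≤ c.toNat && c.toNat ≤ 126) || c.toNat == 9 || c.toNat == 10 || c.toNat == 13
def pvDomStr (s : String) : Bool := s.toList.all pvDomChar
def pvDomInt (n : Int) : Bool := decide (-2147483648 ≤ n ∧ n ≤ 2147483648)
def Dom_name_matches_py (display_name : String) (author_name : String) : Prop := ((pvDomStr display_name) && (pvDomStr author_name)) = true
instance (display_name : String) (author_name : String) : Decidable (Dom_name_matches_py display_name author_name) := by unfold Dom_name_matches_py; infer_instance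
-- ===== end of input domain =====

-- B replaces A's nested scan in _initial_match by three lookup sets built once from the
-- b-side tokens and one pass over the a-side tokens (objective: alternative).

-- ===== PORT A =====
-- _split_name, identical module-level helper in both programs (B keeps it unchanged).
-- re.sub(r"[.\-,]", " ", s): the pattern is a class of three single characters, so the
-- substitution equals three successive single-character replaces (exact).
def splitName (name : String) : List String × String :=
  let parts0 := PySem.Str.split₀
    (PySem.Str.replace (PySem.Str.replace (PySem.Str.replace
      (PySem.Str.lower name) "." " ") "-" " ") "," " ")
  let parts := parts0.filter (fun p => p != "")
  if parts.length < 2 then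
    (parts, match parts with | [] => "" | p :: _ => p)
  else
    -- parts[-1] is in range here (parts.length ≥ 2)
    (PySem.List.slice parts none (some (-1)), PySem.List.pyGetD parts (-1) "")

def initialMatchA (tokensA tokensB : List String) : Bool :=
  tokensA.any (fun ta => tokensB.any (fun tb =>
    ta == tb
    || (PySem.Str.len ta == 1 && PySem.Str.startswith tb ta)
    || (PySem.Str.len tb == 1 && PySem.Str.startswith ta tb)))

def name_matches_py (display_name : String) (author_name : String) : Bool :=
  let ga := splitName display_name
  let gb := splitName author_name
  if ga.2 != gb.2 then false
  else if ga.1.isEmpty || gb.1.isEmpty then true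
  else initialMatchA ga.1 gb.1

-- ===== PORT B =====
def initialIndexMatch (tokensA tokensB : List String) : Bool :=
  let fullB : PySem.Set String := PySem.Set.ofList tokensB
  let initialsB : PySem.Set String :=
    PySem.Set.ofList (tokensB.map (fun tb => PySem.Str.slice tb none (some 1)))
  let singlesB : PySem.Set String :=
    PySem.Set.ofList (tokensB.filter (fun tb => PySem.Str.len tb == 1))
  tokensA.any (fun ta =>
    fullB.contains ta
    || (PySem.Str.len ta == 1 && initialsB.contains ta)
    || (decide (1 < PySem.Str.len ta)
        && singlesB.contains (PySem.Str.slice ta none (some 1))))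

def name_matches_py_alt (display_name : String) (author_name : String) : Bool :=
  let ga := splitName display_name
  let gb := splitName author_name
  if ga.2 != gb.2 then false
  else if ga.1.isEmpty || gb.1.isEmpty then true
  else initialIndexMatch ga.1 gb.1

-- ===== PRECONDITION & SPEC =====
def Spec_name_matches_py (display_name : String) (author_name : String) (out : Bool) : Prop := out = name_matches_py_alt display_name author_name
instance (display_name : String) (author_name : String) (out : Bool) : Decidable (Spec_name_matches_py display_name author_name out) := by unfold Spec_name_matches_py; infer_instance

-- ===== CLAIM (what is proved, stated in full; the proofs are below) =====
def Claim_equal_name_matches_py : Prop := ∀ (display_name : String) (author_name : String), Dom_name_matches_py display_name author_name → Spec_name_matches_py display_name author_name (name_matches_py display_name author_name)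

-- ===== LEMMAS AND PROOFS =====

-- a length-1 string p is a prefix of s iff it is s's first character, i.e. s[:1] = p
lemma startswith_single (s p : String) (hp : PySem.Str.len p = 1) :
    PySem.Str.startswith s p = true ↔ PySem.Str.slice s none (some 1) = p := by
  have hp1 : p.toList.length = 1 := by
    have := PySem.Str.len_eq p; omega
  rw [← String.toList_inj, PySem.Str.toList_slice, PySem.Chars.slice,
      PySem.List.slice_to _ (by norm_num)]
  simp only [PySem.Str.startswith, PySem.Chars.startswith, List.isPrefixOf_iff_prefix]
  obtain ⟨c, hc⟩ : ∃ c, p.toList = [c] := List.length_eq_one_iff.mp hp1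
  rw [hc]
  cases s.toList with
  | nil => simp
  | cons d t => simp [List.cons_prefix_cons, eq_comm]

lemma len_prefix_le (s p : String) (h : PySem.Str.startswith s p = true) :
    PySem.Str.len p ≤ PySem.Str.len s := by
  simp only [PySem.Str.startswith, PySem.Chars.startswith, List.isPrefixOf_iff_prefix] at h
  have := h.length_le
  simp only [PySem.Str.len_eq]; omega

lemma slice_one_self (p : String) (hp : PySem.Str.len p = 1) :
    PySem.Str.slice p none (some 1) = p := by
  rw [← String.toList_inj, PySem.Str.toList_slice, PySem.Chars.slice,
      PySem.List.slice_to _ (by norm_num)]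
  have hp1 : p.toList.length = 1 := by have := PySem.Str.len_eq p; omega
  simp [List.take_of_length_le, hp1]

lemma inner_eq (ta : String) (B : List String) :
    B.any (fun tb =>
      ta == tb
      || (PySem.Str.len ta == 1 && PySem.Str.startswith tb ta)
      || (PySem.Str.len tb == 1 && PySem.Str.startswith ta tb))
    = ((PySem.Set.ofList B).contains ta
       || (PySem.Str.len ta == 1
           && (PySem.Set.ofList (B.map (fun tb => PySem.Str.slice tb none (some 1)))).contains ta)
       || (decide (1 < PySem.Str.len ta)
           && (PySem.Set.ofList (B.filter (fun tb => PySem.Str.len tb == 1))).contains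
              (PySem.Str.slice ta none (some 1)))) := by
  rw [Bool.eq_iff_iff]
  simp only [List.any_eq_true, Bool.or_eq_true, Bool.and_eq_true, beq_iff_eq,
    decide_eq_true_iff, PySem.Set.contains_iff, PySem.Set.mem_ofList, List.mem_map,
    List.mem_filter]
  constructor
  · rintro ⟨tb, htb, (heq | ⟨h1, hsw⟩) | ⟨h2, hsw⟩⟩
    · exact Or.inl (Or.inl (heq ▸ htb))
    · exact Or.inl (Or.inr ⟨h1, tb, htb, (startswith_single tb ta h1).mp hsw⟩)
    · rcases lt_or_ge 1 (PySem.Str.len ta) with hgt | hle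
      · refine Or.inr ⟨hgt, ?_⟩
        rw [(startswith_single ta tb h2).mp hsw]
        exact ⟨htb, h2⟩
      · have hge := len_prefix_le ta tb hsw
        have h1 : PySem.Str.len ta = 1 := by omega
        have hs := (startswith_single ta tb h2).mp hsw
        rw [slice_one_self ta h1] at hs
        exact Or.inl (Or.inl (hs ▸ htb))
  · rintro ((hmem | ⟨h1, tb, htb, hsl⟩) | ⟨hgt, hmem, h2⟩)
    · exact ⟨ta, hmem, Or.inl (Or.inl rfl)⟩
    · exact ⟨tb, htb, Or.inl (Or.inr ⟨h1, (startswith_single tb ta h1).mpr hsl⟩)⟩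
    · exact ⟨PySem.Str.slice ta none (some 1), hmem,
        Or.inr ⟨h2, (startswith_single ta _ h2).mpr rfl⟩⟩

lemma match_eq (A B : List String) : initialMatchA A B = initialIndexMatch A B := by
  simp only [initialMatchA, initialIndexMatch, inner_eq]

-- ===== VERDICT (by name: the statement is the Claim_ definition above) =====
theorem name_matches_py_spec : Claim_equal_name_matches_py := by
  intro d a _
  unfold Spec_name_matches_py name_matches_py name_matches_py_alt
  simp only [match_eq]
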